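-- pv_equiv track=rewrite | github.com/xixiaxibro/Target-Generation-Algorithms | algorithms/six_tree/generation.py | _enumerate_pattern
-- ===== SOURCE A (Python) =====
-- from typing import Iterator, List, Set
--
-- _HEX_CHARS: str = "0123456789abcdef"
--
-- def _enumerate_pattern(
--     addr: List[str],
--     wildcards: List[int],
--     idx: int,
-- ) -> Iterator[str]:
--     """Depth-first enumeration of all addresses matching a wildcard pattern."""
--     if idx == len(wildcards):
--         yield "".join(addr)
--         return
--     pos = wildcards[idx]
--     for c in _HEX_CHARS:
--         addr[pos] = c
--         yield from _enumerate_pattern(addr, wildcards, idx + 1)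
-- ===== SOURCE B (Python) =====
-- _HEX_CHARS: str = "0123456789abcdef"
--
-- def _enumerate_pattern(addr, wildcards, idx):
--     """Iterative enumeration: collect the wildcard slots the recursion would scan,
--     build every hex-character combination for them up front (lexicographic order
--     = A's DFS order), then emit one address per combination built from the
--     original addr (addr is not mutated)."""
--     positions = [wildcards[i] for i in range(idx, len(wildcards))]
--     combos = [()]
--     for _ in positions:
--         combos = [(c,) + t for c in _HEX_CHARS for t in combos]
--     for combo in combos:
--         out = list(addr)
--         for pos, c in zip(positions, combo):
--             out[pos] = c
--         yield "".join(out)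
-- ===== Notes on version B (the rewrite author's own statement) =====
-- stated objective: alternative
-- what changed: Replaces A's depth-first recursion that mutates addr in place with an iterative construction: collect the scanned wildcard positions, build the list of all hex-character combinations for them up front (in A's DFS/lexicographic order), then map each combination to an output string assembled from a fresh copy of addr; B does not mutate addr (return-value equivalence only).
import Mathlib
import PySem

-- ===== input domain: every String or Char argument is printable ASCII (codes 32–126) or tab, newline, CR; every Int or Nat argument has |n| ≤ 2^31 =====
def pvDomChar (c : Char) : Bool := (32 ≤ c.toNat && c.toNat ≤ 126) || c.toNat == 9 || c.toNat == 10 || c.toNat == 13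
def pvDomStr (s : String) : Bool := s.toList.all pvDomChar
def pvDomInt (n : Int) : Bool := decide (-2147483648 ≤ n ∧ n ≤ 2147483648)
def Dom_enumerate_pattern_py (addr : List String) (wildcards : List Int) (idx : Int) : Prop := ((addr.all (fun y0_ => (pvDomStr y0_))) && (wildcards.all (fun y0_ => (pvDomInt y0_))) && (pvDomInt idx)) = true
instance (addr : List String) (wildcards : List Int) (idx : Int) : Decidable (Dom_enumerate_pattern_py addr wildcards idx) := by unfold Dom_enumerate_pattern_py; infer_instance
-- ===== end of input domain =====

-- B replaces A's in-place-mutating DFS recursion by "build all hex combinations, then map each to a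
-- fresh output string"; A mutates addr in place while B does not, so the equivalence proved here is
-- about the returned (yielded) values only.

-- ===== PORT A =====

-- _HEX_CHARS (module constant shared by both versions)
def pvHexChars : List Char := "0123456789abcdef".toList

-- needed by the ports' termination proofs
theorem pv_lt_of_pyGet?_some {α : Type} {xs : List α} {i : Int} {x : α}
    (h : PySem.List.pyGet? xs i = some x) : i < (xs.length : Int) := by
  by_contra hn
  have hnone : PySem.List.pyGet? xs i = none := by
    rw [PySem.List.pyGet?_eq_none_iff]
    intro hr
    exact hn hr.2
  rw [hnone] at h
  simp at h

-- A's recursion, returning (list of yielded strings, final state of the mutated addr).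
mutual
  -- one call of _enumerate_pattern(addr, wildcards, idx)
  def pvGoA (addr : List String) (wildcards : List Int) (idx : Int) :
      List String × List String :=
    if idx = (wildcards.length : Int) then
      ([PySem.Str.join "" addr], addr)            -- yield "".join(addr)
    else
      match h : PySem.List.pyGet? wildcards idx with  -- pos = wildcards[idx]
      | none => ([], addr)                        -- IndexError: excluded by Pre_
      | some pos => pvLoopA pvHexChars [] addr wildcards idx pos (pv_lt_of_pyGet?_some h)
  termination_by (wildcards.length + 1 - idx).toNat * 18
  decreasing_by
    have := pv_lt_of_pyGet?_some h
    simp [pvHexChars]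
    omega

  -- for c in _HEX_CHARS: addr[pos] = c; yield from _enumerate_pattern(addr, wildcards, idx + 1)
  def pvLoopA (cs : List Char) (acc : List String) (addr : List String)
      (wildcards : List Int) (idx : Int) (pos : Int)
      (hlt : idx < (wildcards.length : Int)) : List String × List String :=
    match cs with
    | [] => (acc, addr)
    | c :: rest =>
        let addr1 := PySem.List.pySetD addr pos (String.ofList [c])  -- addr[pos] = c (out of range raises: excluded by Pre_)
        let r := pvGoA addr1 wildcards (idx + 1)
        pvLoopA rest (acc ++ r.1) r.2 wildcards idx pos hlt
  termination_by (wildcards.length - idx).toNat * 18 + cs.length + 1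
  decreasing_by
    all_goals simp
end

def enumerate_pattern_py (addr : List String) (wildcards : List Int) (idx : Int) : List String :=
  (pvGoA addr wildcards idx).1

-- ===== PORT B =====

def enumerate_pattern_py_alt (addr : List String) (wildcards : List Int) (idx : Int) : List String :=
  let positions := (PySem.List.pyRange idx (wildcards.length : Int) 1).map
    (fun i => PySem.List.pyGetD wildcards i 0)                         -- positions = [wildcards[i] for i in range(idx, len(wildcards))]; pyGetD is exact under Pre_ (outside it wildcards[i] raises)
  let combos := positions.foldl                                        -- combos = [()] ; for _ in positions: combos = [(c,)+t for c in _HEX_CHARS for t in combos]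
    (fun acc _ => pvHexChars.flatMap (fun c => acc.map (fun t => c :: t))) [[]]
  combos.map (fun combo =>                                             -- for combo in combos: out = list(addr); assignments; yield "".join(out)
    PySem.Str.join ""
      ((positions.zip combo).foldl
        (fun a pc => PySem.List.pySetD a pc.1 (String.ofList [pc.2])) addr))

-- ===== PRECONDITION & SPEC =====
-- Pre_ holds exactly where A returns normally: it excludes only the inputs on which A raises
-- IndexError — a cursor idx outside [-len(wildcards), len(wildcards)], or a scanned wildcard
-- position outside addr's index range.
def Pre_enumerate_pattern_py (addr : List String) (wildcards : List Int) (idx : Int) : Prop :=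
  -(wildcards.length : Int) ≤ idx ∧ idx ≤ (wildcards.length : Int) ∧
    ∀ i ∈ PySem.List.pyRange idx (wildcards.length : Int) 1,
      PySem.Raise.InRange addr.length (PySem.List.pyGetD wildcards i 0)
instance (addr : List String) (wildcards : List Int) (idx : Int) : Decidable (Pre_enumerate_pattern_py addr wildcards idx) := by unfold Pre_enumerate_pattern_py; infer_instance

def pvWitness_enumerate_pattern_py : List String × List Int × Int := (["a", "b"], [0], 0)

def Spec_enumerate_pattern_py (addr : List String) (wildcards : List Int) (idx : Int) (out : List String) : Prop := out = enumerate_pattern_py_alt addr wildcards idx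
instance (addr : List String) (wildcards : List Int) (idx : Int) (out : List String) : Decidable (Spec_enumerate_pattern_py addr wildcards idx out) := by unfold Spec_enumerate_pattern_py; infer_instance

-- ===== CLAIM (what is proved, stated in full; the proofs are below) =====
def Claim_equal_enumerate_pattern_py : Prop := ∀ (addr : List String) (wildcards : List Int) (idx : Int), Dom_enumerate_pattern_py addr wildcards idx → Pre_enumerate_pattern_py addr wildcards idx → Spec_enumerate_pattern_py addr wildcards idx (enumerate_pattern_py addr wildcards idx)

-- ===== LEMMAS AND PROOFS =====

-- canonical (wrapped) cell index of a Python index i in a list of length n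
def pvNorm (n : Nat) (i : Int) : Nat := if 0 ≤ i then i.toNat else n - (-i).toNat

theorem pvSetD_eq_set {α : Type} (xs : List α) {i : Int} (v : α)
    (h : PySem.Raise.InRange xs.length i) :
    PySem.List.pySetD xs i v = xs.set (pvNorm xs.length i) v := by
  obtain ⟨h1, h2⟩ := h
  simp only [PySem.List.pySetD, PySem.List.pySet?, PySem.List.pyIdx?, pvNorm]
  by_cases h0 : 0 ≤ i <;> simp [h0, h1, h2]

theorem pvNorm_lt {n : Nat} {i : Int} (h : PySem.Raise.InRange n i) : pvNorm n i < n := by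
  obtain ⟨h1, h2⟩ := h
  unfold pvNorm
  by_cases h0 : 0 ≤ i <;> simp [h0] <;> omega

-- the char sequences of all combinations, in A's DFS (= lexicographic) order
def pvCombos : Nat → List (List Char)
  | 0 => [[]]
  | n + 1 => pvHexChars.flatMap (fun c => (pvCombos n).map (fun t => c :: t))
-- the per-combination assignment: out[pos] = c for (pos, c) in zip(ps, t), applied to b
def pvAssign (ps : List Int) (t : List Char) (b : List String) : List String :=
  (ps.zip t).foldl (fun a pc => PySem.List.pySetD a pc.1 (String.ofList [pc.2])) b

-- b agrees with b0 outside the cells named by P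
def pvAgree (P : List Int) (b0 b : List String) : Prop :=
  b.length = b0.length ∧ ∀ j : Nat, (∀ p ∈ P, pvNorm b0.length p ≠ j) → b[j]? = b0[j]?

theorem pvAgree_refl (P : List Int) (b0 : List String) : pvAgree P b0 b0 := ⟨rfl, fun _ _ => rfl⟩
-- A's recursion, rendered as structural recursion over the remaining positions list
def pvSpec : List Int → List String → List String × List String
  | [], addr => ([PySem.Str.join "" addr], addr)
  | p :: ps, addr =>
      pvHexChars.foldl
        (fun st c =>
          let r := pvSpec ps (PySem.List.pySetD st.2 p (String.ofList [c]))
          (st.1 ++ r.1, r.2))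
        ([], addr)

-- A's loop helper is a fold
theorem pvLoopA_eq_foldl (cs : List Char) (acc : List String) (addr : List String)
    (wildcards : List Int) (idx : Int) (pos : Int) (hlt : idx < (wildcards.length : Int)) :
    pvLoopA cs acc addr wildcards idx pos hlt =
      cs.foldl
        (fun st c =>
          let r := pvGoA (PySem.List.pySetD st.2 pos (String.ofList [c])) wildcards (idx + 1)
          (st.1 ++ r.1, r.2))
        (acc, addr) := by
  induction cs generalizing acc addr with
  | nil => rw [pvLoopA]; rfl
  | cons c rest ih => rw [pvLoopA, ih]; rfl

-- A's port equals the structural recursion over the positions A's cursor scans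
theorem pvGoA_eq_spec (addr : List String) (wildcards : List Int) (idx : Int)
    (h0 : -(wildcards.length : Int) ≤ idx) (h1 : idx ≤ (wildcards.length : Int)) :
    pvGoA addr wildcards idx =
      pvSpec ((PySem.List.pyRange idx (wildcards.length : Int) 1).map
        (fun i => PySem.List.pyGetD wildcards i 0)) addr := by
  suffices key : ∀ (n : Nat) (idx : Int) (addr : List String),
      -(wildcards.length : Int) ≤ idx → idx ≤ (wildcards.length : Int) →
      ((wildcards.length : Int) - idx).toNat = n →
      pvGoA addr wildcards idx =
        pvSpec ((PySem.List.pyRange idx (wildcards.length : Int) 1).map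
          (fun i => PySem.List.pyGetD wildcards i 0)) addr from
    key _ idx addr h0 h1 rfl
  intro n
  induction n with
  | zero =>
      intro idx addr hi0 hi1 hn
      have heq : idx = (wildcards.length : Int) := by omega
      rw [pvGoA, if_pos heq, PySem.List.pyRange_one]
      have hz : ((wildcards.length : Int) - idx).toNat = 0 := by omega
      rw [hz]
      simp [pvSpec]
  | succ n ih =>
      intro idx addr hi0 hi1 hn
      have hlt : idx < (wildcards.length : Int) := by omega
      have hne : idx ≠ (wildcards.length : Int) := by omega
      have hget : PySem.List.pyGet? wildcards idx = some (PySem.List.pyGetD wildcards idx 0) := by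
        cases hc : PySem.List.pyGet? wildcards idx with
        | none =>
            rw [PySem.List.pyGet?_eq_none_iff] at hc
            exact absurd ⟨hi0, hlt⟩ hc
        | some v => simp [PySem.List.pyGetD, hc]
      rw [pvGoA, if_neg hne, PySem.List.pyRange_one_cons hlt, List.map_cons]
      split
      · rename_i hnone
        rw [hnone] at hget
        simp at hget
      · rename_i pos hsome
        rw [hget] at hsome
        injection hsome with hpos
        subst hpos
        rw [pvLoopA_eq_foldl]
        show _ = pvHexChars.foldl _ ([], addr)
        have hfun :
            (fun (st : List String × List String) (c : Char) =>
              let r := pvGoA (PySem.List.pySetD st.2 (PySem.List.pyGetD wildcards idx 0)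
                (String.ofList [c])) wildcards (idx + 1)
              (st.1 ++ r.1, r.2)) =
            (fun (st : List String × List String) (c : Char) =>
              let r := pvSpec ((PySem.List.pyRange (idx + 1) (wildcards.length : Int) 1).map
                  (fun i => PySem.List.pyGetD wildcards i 0))
                (PySem.List.pySetD st.2 (PySem.List.pyGetD wildcards idx 0) (String.ofList [c]))
              (st.1 ++ r.1, r.2)) := by
          funext st c
          rw [ih (idx + 1) _ (by omega) (by omega) (by omega)]
        rw [hfun]

-- the main characterisation: A's recursion yields exactly B's map over all combinations,
-- and its final state still agrees with the base outside the written cells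
theorem pvSpec_main (ps : List Int) (b0 : List String)
    (hin : ∀ p ∈ ps, PySem.Raise.InRange b0.length p) (b : List String)
    (hag : pvAgree ps b0 b) :
    (pvSpec ps b).1 =
        (pvCombos ps.length).map (fun t => PySem.Str.join "" (pvAssign ps t b0)) ∧
      pvAgree ps b0 (pvSpec ps b).2 := by
  induction ps generalizing b0 b with
  | nil =>
      have hb : b = b0 := List.ext_getElem? (fun i => hag.2 i (by simp))
      subst hb
      exact ⟨by simp [pvSpec, pvCombos, pvAssign], pvAgree_refl _ _⟩
  | cons p ps ih =>
      have hp : PySem.Raise.InRange b0.length p := hin p (List.mem_cons_self ..)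
      have hnlt := pvNorm_lt hp
      have hins : ∀ q ∈ ps, PySem.Raise.InRange b0.length q :=
        fun q hq => hin q (List.mem_cons_of_mem _ hq)
      have aux : ∀ (cs : List Char) (acc : List String) (b : List String),
          pvAgree (p :: ps) b0 b →
          (cs.foldl (fun st c =>
              let r := pvSpec ps (PySem.List.pySetD st.2 p (String.ofList [c]))
              (st.1 ++ r.1, r.2)) (acc, b)).1 =
            acc ++ cs.flatMap (fun c => (pvCombos ps.length).map (fun t =>
              PySem.Str.join "" (pvAssign ps t (PySem.List.pySetD b0 p (String.ofList [c]))))) ∧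
          pvAgree (p :: ps) b0
            ((cs.foldl (fun st c =>
              let r := pvSpec ps (PySem.List.pySetD st.2 p (String.ofList [c]))
              (st.1 ++ r.1, r.2)) (acc, b)).2) := by
        intro cs
        induction cs with
        | nil => intro acc b hb; exact ⟨by simp, hb⟩
        | cons c cs ihc =>
            intro acc b hb
            have hbl : b.length = b0.length := hb.1
            have hpb : PySem.Raise.InRange b.length p := hbl ▸ hp
            have hlen0 : (PySem.List.pySetD b0 p (String.ofList [c])).length = b0.length :=
              PySem.List.length_pySetD ..
            have hag' : pvAgree ps (PySem.List.pySetD b0 p (String.ofList [c]))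
                (PySem.List.pySetD b p (String.ofList [c])) := by
              constructor
              · rw [PySem.List.length_pySetD, PySem.List.length_pySetD, hbl]
              · intro j hj
                rw [hlen0] at hj
                rw [pvSetD_eq_set b0 _ hp, pvSetD_eq_set b _ hpb, hbl]
                by_cases hje : pvNorm b0.length p = j
                · subst hje
                  rw [List.getElem?_set_self (by omega), List.getElem?_set_self (by omega)]
                · rw [List.getElem?_set_ne hje, List.getElem?_set_ne hje]
                  refine hb.2 j ?_
                  intro q hq
                  rcases List.mem_cons.mp hq with rfl | hq'
                  · exact hje
                  · exact hj q hq'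
            have hins' : ∀ q ∈ ps, PySem.Raise.InRange
                (PySem.List.pySetD b0 p (String.ofList [c])).length q := by
              rw [hlen0]; exact hins
            have hmain := ih _ hins' _ hag'
            have hb2 : pvAgree (p :: ps) b0
                (pvSpec ps (PySem.List.pySetD b p (String.ofList [c]))).2 := by
              constructor
              · rw [hmain.2.1, hlen0]
              · intro j hj
                have hjp : pvNorm b0.length p ≠ j := hj p (List.mem_cons_self ..)
                have hjps : ∀ q ∈ ps, pvNorm (PySem.List.pySetD b0 p
                    (String.ofList [c])).length q ≠ j := by
                  rw [hlen0]; exact fun q hq => hj q (List.mem_cons_of_mem _ hq)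
                rw [hmain.2.2 j hjps, pvSetD_eq_set b0 _ hp, List.getElem?_set_ne hjp]
            obtain ⟨auxeq, auxag⟩ := ihc (acc ++ (pvSpec ps (PySem.List.pySetD b p
              (String.ofList [c]))).1) (pvSpec ps (PySem.List.pySetD b p (String.ofList [c]))).2 hb2
            constructor
            · simp only [List.foldl_cons, List.flatMap_cons]
              rw [auxeq, hmain.1]
              simp [List.append_assoc]
            · simpa only [List.foldl_cons] using auxag
      have hres := aux pvHexChars [] b hag
      refine ⟨?_, hres.2⟩
      rw [show pvSpec (p :: ps) b = pvHexChars.foldl (fun st c =>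
          let r := pvSpec ps (PySem.List.pySetD st.2 p (String.ofList [c]))
          (st.1 ++ r.1, r.2)) ([], b) from rfl]
      rw [hres.1]
      simp only [List.length_cons, pvCombos, List.map_flatMap, List.nil_append]
      congr 1
      funext c
      simp only [Function.comp_def, List.map_map]
      congr 1

-- B's iterative combos construction builds pvCombos
theorem pvCombos_foldl (ps : List Int) :
    ps.foldl (fun acc _ => pvHexChars.flatMap (fun c => acc.map (fun t => c :: t))) [[]] =
      pvCombos ps.length := by
  suffices hgen : ∀ (qs : List Int) (L : List (List Char)),
      qs.foldl (fun acc _ => pvHexChars.flatMap (fun c => acc.map (fun t => c :: t))) L =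
        (fun M => pvHexChars.flatMap (fun c => M.map (fun t => c :: t)))^[qs.length] L by
    rw [hgen]
    induction ps.length with
    | zero => rfl
    | succ n ih => rw [Function.iterate_succ_apply', ih]; rfl
  intro qs
  induction qs with
  | nil => intro L; rfl
  | cons q qs ih =>
      intro L
      simp only [List.foldl_cons, List.length_cons, Function.iterate_succ_apply]
      exact ih _

-- ===== VERDICT (by name: the statement is the Claim_ definition above) =====
theorem enumerate_pattern_py_spec : Claim_equal_enumerate_pattern_py := by
  intro addr wildcards idx _ hpre
  obtain ⟨h0, h1, hin⟩ := hpre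
  simp only [Spec_enumerate_pattern_py, enumerate_pattern_py, enumerate_pattern_py_alt]
  rw [pvCombos_foldl, pvGoA_eq_spec addr wildcards idx h0 h1]
  have hin' : ∀ p ∈ (PySem.List.pyRange idx (wildcards.length : Int) 1).map
      (fun i => PySem.List.pyGetD wildcards i 0), PySem.Raise.InRange addr.length p := by
    intro p hp
    obtain ⟨i, hi, rfl⟩ := List.mem_map.mp hp
    exact hin i hi
  have := (pvSpec_main ((PySem.List.pyRange idx (wildcards.length : Int) 1).map
    (fun i => PySem.List.pyGetD wildcards i 0)) addr hin' addr (pvAgree_refl _ _)).1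
  rw [this]
  rfl
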